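-- pv_equiv track=rewrite | github.com/dododoyo/Competitive-Programming | !CodeForces/A2SV(Div2)-Contest15/E_Same_Differences.py | valid_indices
-- ===== SOURCE A (Python) =====
-- from collections import defaultdict
--
-- def valid_indices(n,arr):
--     sol=0
--     dic=defaultdict(int)
--     for i in range(n):
--         x=arr[i]-i
--         sol+=dic[x]
--         dic[x]+=1
--     return sol
-- ===== SOURCE B (Python) =====
-- from collections import Counter
--
-- def valid_indices(n, arr):
--     groups = Counter(arr[i] - i for i in range(n))
--     return sum(c * (c - 1) // 2 for c in groups.values())
-- ===== Notes on version B (the rewrite author's own statement) =====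
-- stated objective: alternative
-- what changed: Replaces A's single incremental pass (add current dict count to the running total, then increment) with a two-phase scheme: first build the complete frequency table of the key arr[i]-i with a Counter, then sum c*(c-1)//2 over the group sizes.
import Mathlib
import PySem

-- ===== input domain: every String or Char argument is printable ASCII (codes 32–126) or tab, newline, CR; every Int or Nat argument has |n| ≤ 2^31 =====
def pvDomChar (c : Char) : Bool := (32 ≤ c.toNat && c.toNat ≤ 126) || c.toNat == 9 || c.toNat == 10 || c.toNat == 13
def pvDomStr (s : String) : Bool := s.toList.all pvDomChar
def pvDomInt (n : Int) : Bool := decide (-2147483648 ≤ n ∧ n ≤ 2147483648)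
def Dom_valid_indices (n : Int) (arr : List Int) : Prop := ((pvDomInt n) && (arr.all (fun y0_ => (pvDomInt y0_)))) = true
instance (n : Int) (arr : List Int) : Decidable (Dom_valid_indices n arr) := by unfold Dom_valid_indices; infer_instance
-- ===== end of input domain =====

-- B replaces A's single incremental add-then-increment pass by a two-phase scheme: build the full
-- frequency table of the key arr[i]-i first, then sum c*(c-1)//2 over the group sizes (objective: alternative).

-- ===== PORT A =====
def valid_indices (n : Int) (arr : List Int) : Int :=
  ((PySem.List.pyRange 0 n 1).foldl
    (fun (st : Int × PySem.Dict Int Int) i =>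
      let x := PySem.List.pyGetD arr i 0 - i
      let c := st.2.getD x 0
      (st.1 + c, st.2.insert x (c + 1)))
    (0, PySem.Dict.empty)).1

-- ===== PORT B =====
def valid_indices_alt (n : Int) (arr : List Int) : Int :=
  let keys := (PySem.List.pyRange 0 n 1).map (fun i => PySem.List.pyGetD arr i 0 - i)
  let groups := PySem.Dict.counter keys
  (groups.values.map (fun c => PySem.Int.floordiv (c * (c - 1)) 2)).sum

-- ===== PRECONDITION & SPEC =====
-- Pre_ excludes exactly the inputs where Python's arr[i] raises IndexError (n exceeds len(arr)); both A and B raise there.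
def Pre_valid_indices (n : Int) (arr : List Int) : Prop := n ≤ (arr.length : Int)
instance (n : Int) (arr : List Int) : Decidable (Pre_valid_indices n arr) := by unfold Pre_valid_indices; infer_instance
def pvWitness_valid_indices : Int × List Int := (3, [5, 6, 2])

def Spec_valid_indices (n : Int) (arr : List Int) (out : Int) : Prop := out = valid_indices_alt n arr
instance (n : Int) (arr : List Int) (out : Int) : Decidable (Spec_valid_indices n arr out) := by unfold Spec_valid_indices; infer_instance

-- ===== CLAIM (what is proved, stated in full; the proofs are below) =====
def Claim_equal_valid_indices : Prop := ∀ (n : Int) (arr : List Int), Dom_valid_indices n arr → Pre_valid_indices n arr → Spec_valid_indices n arr (valid_indices n arr)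

-- ===== LEMMAS AND PROOFS =====

-- A's loop body, as a function of the key x = arr[i]-i only.
def pvStepA (st : Int × PySem.Dict Int Int) (x : Int) : Int × PySem.Dict Int Int :=
  (st.1 + st.2.getD x 0, st.2.insert x (st.2.getD x 0 + 1))

lemma valid_indices_eq_foldl_keys (n : Int) (arr : List Int) :
    valid_indices n arr =
      (((PySem.List.pyRange 0 n 1).map (fun i => PySem.List.pyGetD arr i 0 - i)).foldl
        pvStepA (0, PySem.Dict.empty)).1 := by
  simp [valid_indices, pvStepA, List.foldl_map]

lemma pvStepA_snd (K : List Int) (s : Int) (d : PySem.Dict Int Int) :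
    (K.foldl pvStepA (s, d)).2 = K.foldl (fun d x => d.insert x (d.getD x 0 + 1)) d := by
  induction K generalizing s d with
  | nil => rfl
  | cons x K ih => simp [pvStepA, ih]

-- sum over a nodup list when the summand changes at exactly one member
lemma pv_sum_map_update {l : List Int} (hnd : l.Nodup) {x : Int} (hx : x ∈ l)
    (f g : Int → Int) (hfg : ∀ k ∈ l, k ≠ x → g k = f k) :
    (l.map g).sum = (l.map f).sum + (g x - f x) := by
  induction l with
  | nil => cases hx
  | cons a l ih =>
    rcases List.mem_cons.mp hx with h | h
    · subst h
      have : l.map g = l.map f := by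
        apply List.map_congr_left
        intro k hk
        exact hfg k (List.mem_cons_of_mem _ hk) (fun he => (List.nodup_cons.mp hnd).1 (he ▸ hk))
      simp [this]; ring
    · have hax : a ≠ x := fun he => (List.nodup_cons.mp hnd).1 (he ▸ h)
      have := ih (List.nodup_cons.mp hnd).2 h (fun k hk hkx => hfg k (List.mem_cons_of_mem _ hk) hkx)
      simp [this, hfg a (List.mem_cons_self) hax]; ring

-- the group-size sum Σ_{k ∈ set(K)} c_k (c_k - 1)
def pvT (K : List Int) : Int :=
  ((PySem.Set.ofList K).map (fun k => (K.count k : Int) * ((K.count k : Int) - 1))).sum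

lemma pvT_append (K : List Int) (x : Int) :
    pvT (K ++ [x]) = pvT K + 2 * (K.count x : Int) := by
  have hset : PySem.Set.ofList (K ++ [x]) = PySem.Set.add (PySem.Set.ofList K) x := by
    simp [PySem.Set.ofList_eq_foldl, List.foldl_append]
  by_cases hx : x ∈ K
  · have hmem : x ∈ PySem.Set.ofList K := (PySem.Set.mem_ofList K x).mpr hx
    have hadd : PySem.Set.add (PySem.Set.ofList K) x = PySem.Set.ofList K := by
      simp [PySem.Set.add, PySem.Set.contains, hmem]
    have hupd := pv_sum_map_update (l := PySem.Set.ofList K) (PySem.Set.nodup_ofList K) hmem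
      (fun k => (K.count k : Int) * ((K.count k : Int) - 1))
      (fun k => ((K ++ [x]).count k : Int) * (((K ++ [x]).count k : Int) - 1))
      (by
        intro k hk hkx
        have : (K ++ [x]).count k = K.count k := by
          simp [List.count_append, Ne.symm hkx]
        simp [this])
    have hcx : (K ++ [x]).count x = K.count x + 1 := by
      simp [List.count_append]
    unfold pvT
    rw [hset, hadd, hupd]
    simp only [hcx]
    push_cast
    ring
  · have hmem : x ∉ PySem.Set.ofList K := fun h => hx ((PySem.Set.mem_ofList K x).mp h)
    have hadd : PySem.Set.add (PySem.Set.ofList K) x = PySem.Set.ofList K ++ [x] := by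
      simp [PySem.Set.add, PySem.Set.contains, hmem]
    have hcK : K.count x = 0 := List.count_eq_zero.mpr hx
    have hmap : (PySem.Set.ofList K).map
        (fun k => ((K ++ [x]).count k : Int) * (((K ++ [x]).count k : Int) - 1)) =
        (PySem.Set.ofList K).map (fun k => (K.count k : Int) * ((K.count k : Int) - 1)) := by
      apply List.map_congr_left
      intro k hk
      have hkx : k ≠ x := fun he => hmem (he ▸ hk)
      have : (K ++ [x]).count k = K.count k := by
        simp [List.count_append, Ne.symm hkx]
      simp [this]
    unfold pvT
    rw [hset, hadd, List.map_append, List.sum_append, hmap]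
    simp [hcK, List.count_append]

-- the main invariant: twice A's incremental pair count is the group-size sum
lemma pv_two_mul_solA (K : List Int) :
    2 * (K.foldl pvStepA (0, (PySem.Dict.empty : PySem.Dict Int Int))).1 = pvT K := by
  induction K using List.reverseRecOn with
  | nil =>
    simp [pvT, PySem.Set.ofList]
  | append_singleton K x ih =>
    rw [List.foldl_append]
    have hsnd := pvStepA_snd K 0 (PySem.Dict.empty : PySem.Dict Int Int)
    have hget : ((K.foldl pvStepA (0, (PySem.Dict.empty : PySem.Dict Int Int))).2).getD x 0
        = (K.count x : Int) := by
      rw [hsnd, PySem.Dict.getD_foldl_insert_add_one]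
      simp [PySem.Dict.getD_empty]
    simp only [List.foldl_cons, List.foldl_nil, pvStepA]
    rw [pvT_append]
    simp only [hget] at *
    omega

lemma pv_two_mul_half (c : Int) : 2 * PySem.Int.floordiv (c * (c - 1)) 2 = c * (c - 1) := by
  have he : Even (c * (c - 1)) := by
    have := Int.even_mul_succ_self (c - 1)
    have h1 : (c - 1) * (c - 1 + 1) = c * (c - 1) := by ring
    rwa [h1] at this
  rw [PySem.Int.floordiv_eq_ediv_of_pos (by omega)]
  exact Int.mul_ediv_cancel' (even_iff_two_dvd.mp he)

lemma pv_alt_eq_T (n : Int) (arr : List Int) :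
    2 * valid_indices_alt n arr = pvT ((PySem.List.pyRange 0 n 1).map (fun i => PySem.List.pyGetD arr i 0 - i)) := by
  set K := (PySem.List.pyRange 0 n 1).map (fun i => PySem.List.pyGetD arr i 0 - i) with hK
  have hvals : (PySem.Dict.counter K).values = (PySem.Set.ofList K).map (fun k => (K.count k : Int)) := by
    rw [PySem.Dict.values_eq_map_keys _ (PySem.Dict.nodup_keys_counter K) 0, PySem.Dict.keys_counter]
    exact List.map_congr_left (fun k _ => PySem.Dict.getD_counter K k)
  show 2 * (((PySem.Dict.counter K).values.map (fun c => PySem.Int.floordiv (c * (c - 1)) 2)).sum) = pvT K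
  rw [hvals]
  unfold pvT
  rw [List.map_map]
  induction (PySem.Set.ofList K) with
  | nil => simp
  | cons a l ih =>
    simp only [List.map_cons, List.sum_cons, Function.comp]
    rw [mul_add, ih, pv_two_mul_half]

-- ===== VERDICT (by name: the statement is the Claim_ definition above) =====
theorem valid_indices_spec : Claim_equal_valid_indices := by
  intro n arr _ _
  unfold Spec_valid_indices
  have h1 := pv_two_mul_solA ((PySem.List.pyRange 0 n 1).map (fun i => PySem.List.pyGetD arr i 0 - i))
  have h2 := pv_alt_eq_T n arr
  have h3 := valid_indices_eq_foldl_keys n arr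
  omega
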